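-- pv_equiv track=rewrite | github.com/kenomo/industrial-clip | industrial_clip/datasets/ilid.py | generate_unique_label_dict
-- ===== SOURCE A (Python) =====
-- def generate_unique_label_dict(dataset, label_dict = {}, label_tag="label_short"):
--     labels = [ b for a, b in label_dict.items() ]
--     label_counter = 0 if len(labels) <= 0 else max(labels) + 1
--     for item in dataset:
--         # continue if label is empty
--         if not item[label_tag]:
--             continue
--         # add to label_dict if not already present
--         if item[label_tag] not in label_dict:
--             label_dict[item[label_tag]] = label_counter
--             label_counter += 1
--     return label_dict
-- ===== SOURCE B (Python) =====
-- def generate_unique_label_dict(dataset, label_dict={}, label_tag="label_short"):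
--     # Set-difference + sort-by-first-index algorithm: compute the set of fresh
--     # labels with set operations (losing order), then recover first-appearance
--     # order by sorting on the index of each label's first occurrence.
--     # Mutates label_dict in place, like the original.
--     labs = [item[label_tag] for item in dataset]
--     fresh = set(labs) - set(label_dict) - {""}
--     base = max(label_dict.values(), default=-1) + 1
--     for k, lab in enumerate(sorted(fresh, key=labs.index)):
--         label_dict[lab] = base + k
--     return label_dict
-- ===== Notes on version B (the rewrite author's own statement) =====
-- stated objective: alternative
-- what changed: A detects and numbers fresh labels in one pass with a running counter; B computes the fresh labels by set difference (set(labels) - set(keys) - {''}) and recovers first-appearance order by sorting them on labs.index, then assigns consecutive ids.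
import Mathlib
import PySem

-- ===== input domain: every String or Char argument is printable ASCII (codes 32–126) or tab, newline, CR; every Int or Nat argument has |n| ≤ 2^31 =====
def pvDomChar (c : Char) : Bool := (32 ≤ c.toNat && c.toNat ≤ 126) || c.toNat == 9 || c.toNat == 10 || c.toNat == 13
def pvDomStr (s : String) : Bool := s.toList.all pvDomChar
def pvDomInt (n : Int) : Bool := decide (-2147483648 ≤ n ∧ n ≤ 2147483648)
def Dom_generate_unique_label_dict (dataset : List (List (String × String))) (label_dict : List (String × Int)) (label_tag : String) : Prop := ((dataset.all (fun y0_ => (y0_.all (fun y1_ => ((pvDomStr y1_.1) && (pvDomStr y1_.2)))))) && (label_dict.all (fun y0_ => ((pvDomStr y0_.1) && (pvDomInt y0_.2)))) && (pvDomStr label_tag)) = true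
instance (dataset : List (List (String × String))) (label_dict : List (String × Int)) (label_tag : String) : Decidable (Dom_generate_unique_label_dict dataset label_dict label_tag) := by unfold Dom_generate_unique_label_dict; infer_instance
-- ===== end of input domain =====

-- B replaces A's single pass with a running counter by a set-difference + sort
-- algorithm: the fresh labels are computed with set operations and their order
-- recovered by sorting on the index of each label's first occurrence.
-- Return-value equivalence only; both Pythons mutate label_dict in place identically.


-- ===== PORT A =====
-- the for-loop of A: state = (label_dict, label_counter)
def guldLoopA (label_tag : String) : List (List (String × String)) → PySem.Dict String Int → Int → PySem.Dict String Int
  | [], d, _ => d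
  | item :: rest, d, c =>
    -- item[label_tag]; KeyError (key absent) is excluded by Pre_, the default "" is never used there
    let v := ((PySem.Dict.mk item).get? label_tag).getD ""
    if v = "" then guldLoopA label_tag rest d c
    else if d.contains v then guldLoopA label_tag rest d c
    else guldLoopA label_tag rest (d.insert v c) (c + 1)

def generate_unique_label_dict (dataset : List (List (String × String))) (label_dict : List (String × Int)) (label_tag : String) : List (String × Int) :=
  let d := PySem.Dict.mk label_dict
  let labels := d.values
  let label_counter : Int := if labels.length ≤ 0 then 0 else (PySem.List.max? labels (fun x => x)).getD 0 + 1
  (guldLoopA label_tag dataset d label_counter).items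

-- ===== PORT B =====
def generate_unique_label_dict_alt (dataset : List (List (String × String))) (label_dict : List (String × Int)) (label_tag : String) : List (String × Int) :=
  let d := PySem.Dict.mk label_dict
  let labs := dataset.map (fun item => ((PySem.Dict.mk item).get? label_tag).getD "")
  let fresh := PySem.Set.diff (PySem.Set.diff (PySem.Set.ofList labs) d.keys) [""]
  let base : Int := PySem.List.maxD d.values (fun x => x) (-1) + 1
  -- labs.index lab: always present for lab ∈ fresh, so the getD 0 default is never used
  ((PySem.List.enumerate (PySem.List.sorted fresh (fun lab => (PySem.List.index? labs lab).getD 0) false)).foldl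
    (fun acc p => acc.insert p.2 (base + p.1)) d).items

-- ===== PRECONDITION & SPEC =====
-- Pre_: every dataset item carries the label_tag key (otherwise A raises KeyError)
def Pre_generate_unique_label_dict (dataset : List (List (String × String))) (_label_dict : List (String × Int)) (label_tag : String) : Prop :=
  ∀ item ∈ dataset, (PySem.Dict.mk item).contains label_tag = true
instance (dataset : List (List (String × String))) (label_dict : List (String × Int)) (label_tag : String) : Decidable (Pre_generate_unique_label_dict dataset label_dict label_tag) := by unfold Pre_generate_unique_label_dict; infer_instance

def pvWitness_generate_unique_label_dict : (List (List (String × String))) × (List (String × Int)) × String :=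
  ([[("label_short", "cat")], [("label_short", "")], [("label_short", "cat")], [("label_short", "dog")]], [("prev", 4)], "label_short")

def Spec_generate_unique_label_dict (dataset : List (List (String × String))) (label_dict : List (String × Int)) (label_tag : String) (out : List (String × Int)) : Prop := out = generate_unique_label_dict_alt dataset label_dict label_tag
instance (dataset : List (List (String × String))) (label_dict : List (String × Int)) (label_tag : String) (out : List (String × Int)) : Decidable (Spec_generate_unique_label_dict dataset label_dict label_tag out) := by unfold Spec_generate_unique_label_dict; infer_instance

-- ===== CLAIM (what is proved, stated in full; the proofs are below) =====
def Claim_equal_generate_unique_label_dict : Prop := ∀ (dataset : List (List (String × String))) (label_dict : List (String × Int)) (label_tag : String), Dom_generate_unique_label_dict dataset label_dict label_tag → Pre_generate_unique_label_dict dataset label_dict label_tag → Spec_generate_unique_label_dict dataset label_dict label_tag (generate_unique_label_dict dataset label_dict label_tag)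

-- ===== LEMMAS AND PROOFS =====

-- sequential assignment of consecutive ids, the common shape both ports reduce to
def guldAssign : PySem.Dict String Int → Int → List String → PySem.Dict String Int
  | d, _, [] => d
  | d, c, l :: ls => guldAssign (d.insert l c) (c + 1) ls

-- the label of each dataset item, in order
def guldLabs (label_tag : String) (dataset : List (List (String × String))) : List String :=
  dataset.map (fun item => ((PySem.Dict.mk item).get? label_tag).getD "")

-- "fresh relative to dict d": non-empty and not yet a key
def guldP (d : PySem.Dict String Int) (v : String) : Bool := !(v = "") && !d.contains v

-- the fresh labels of the dataset, in dataset order, duplicates kept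
def guldFresh (label_tag : String) (d : PySem.Dict String Int) (dataset : List (List (String × String))) : List String :=
  (guldLabs label_tag dataset).filter (guldP d)

-- first-occurrence index of a label (total form of labs.index)
def guldIdx (labs : List String) (a : String) : Nat := (PySem.List.index? labs a).getD 0

theorem guldIdx_cons_of_ne {x a : String} (t : List String) (hne : a ≠ x) (hmem : a ∈ t) :
    guldIdx (x :: t) a = guldIdx t a + 1 := by
  unfold guldIdx
  rw [PySem.List.index?_cons_of_ne t (Ne.symm hne)]
  rcases (PySem.List.index?_isSome_iff t a).2 hmem |> Option.isSome_iff_exists.mp with ⟨k, hk⟩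
  have hk' : List.idxOf? a t = some k := hk
  simp [hk']

theorem guldEnum_eq_assign (base : Int) (s : Int) (labs : List String) (d : PySem.Dict String Int) :
    (PySem.List.enumerate labs s).foldl (fun acc p => acc.insert p.2 (base + p.1)) d
      = guldAssign d (base + s) labs := by
  induction labs generalizing s d with
  | nil => rfl
  | cons l ls ih =>
    rw [PySem.List.enumerate_cons]
    simp only [List.foldl_cons, guldAssign, ih]
    ring_nf

theorem guldFoldlAdd_of_mem {x : String} (l : List String) (s : PySem.Set String) (hx : x ∈ s) :
    l.foldl PySem.Set.add s = (l.filter (fun y => y ≠ x)).foldl PySem.Set.add s := by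
  induction l generalizing s with
  | nil => rfl
  | cons y t ih =>
    by_cases h : y = x
    · subst h
      have hadd : PySem.Set.add s y = s := by
        simp [PySem.Set.add, hx]
      simp only [List.foldl_cons, List.filter_cons]
      simp [hadd, ih s hx]
    · have hx' : x ∈ PySem.Set.add s y := (PySem.Set.mem_add s y x).2 (Or.inl hx)
      simp only [List.foldl_cons, List.filter_cons]
      simp only [decide_not, h]
      simp [ih _ hx']

theorem guldFoldlAdd_cons (l : List String) (x : String) (s : PySem.Set String)
    (h : ∀ y ∈ l, y ≠ x) :
    l.foldl PySem.Set.add (x :: s) = x :: l.foldl PySem.Set.add s := by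
  induction l generalizing s with
  | nil => rfl
  | cons y t ih =>
    have hy : y ≠ x := h y (List.mem_cons_self ..)
    have ht : ∀ z ∈ t, z ≠ x := fun z hz => h z (List.mem_cons_of_mem _ hz)
    simp only [List.foldl_cons, PySem.Set.add, PySem.Set.contains_eq_listContains]
    by_cases h2 : y ∈ s
    · simp only [List.contains_cons]
      simp [h2, ih _ ht]
    · simp only [List.contains_cons]
      simp only [List.contains_eq_mem, h2, decide_false, Bool.or_false]
      have hx : (x :: s) ++ [y] = x :: (s ++ [y]) := rfl
      simp [hy, hx, ih _ ht]

theorem guldDedup_cons (x : String) (l : List String) :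
    PySem.List.dedup (x :: l) = x :: PySem.List.dedup (l.filter (fun y => y ≠ x)) := by
  have h0 : PySem.List.dedup (x :: l) = (x :: l).foldl PySem.Set.add [] := by
    rw [PySem.List.dedup_eq_ofList, PySem.Set.ofList_eq_foldl]
  have h1 : PySem.List.dedup (l.filter (fun y => y ≠ x))
      = (l.filter (fun y => y ≠ x)).foldl PySem.Set.add [] := by
    rw [PySem.List.dedup_eq_ofList, PySem.Set.ofList_eq_foldl]
  rw [h0, h1]
  have hadd : PySem.Set.add ([] : PySem.Set String) x = [x] := rfl
  simp only [List.foldl_cons, hadd]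
  rw [guldFoldlAdd_of_mem l [x] (List.mem_singleton.2 rfl)]
  exact guldFoldlAdd_cons _ x [] (fun y hy => by
    have := List.of_mem_filter hy; simpa using this)

-- A's loop = sequential assignment over the ordered dedup of the fresh labels
theorem guldLoopA_eq (label_tag : String) (ds : List (List (String × String)))
    (d : PySem.Dict String Int) (c : Int) :
    guldLoopA label_tag ds d c = guldAssign d c (PySem.List.dedup (guldFresh label_tag d ds)) := by
  induction ds generalizing d c with
  | nil => rfl
  | cons item rest ih =>
    simp only [guldLoopA, guldFresh, guldLabs, List.map_cons, List.filter_cons]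
    set v := ((PySem.Dict.mk item).get? label_tag).getD "" with hv
    by_cases h1 : v = ""
    · have : guldP d v = false := by simp [guldP, h1]
      rw [this, if_pos h1, ih]
      rfl
    · by_cases h2 : d.contains v = true
      · have : guldP d v = false := by simp [guldP, h2]
        rw [this, if_neg h1, if_pos h2, ih]
        rfl
      · have hp : guldP d v = true := by simp [guldP, h1, h2]
        rw [if_neg h1, if_neg (by simp [h2]), ih, hp, if_pos rfl, guldDedup_cons]
        have hfilt : guldFresh label_tag (d.insert v c) rest
            = ((guldLabs label_tag rest).filter (guldP d)).filter (fun y => y ≠ v) := by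
          unfold guldFresh
          rw [List.filter_filter]
          apply List.filter_congr
          intro w _
          simp only [guldP, PySem.Dict.contains_insert]
          by_cases hw : w = v
          · simp [hw, h1]
          · simp [beq_eq_decide, hw]
        rw [hfilt]
        rfl

-- the ordered dedup of a filtered list is strictly increasing in first-occurrence index
theorem guldPairwise (labs : List String) (p : String → Bool) :
    (PySem.List.dedup (labs.filter p)).Pairwise (fun a b => guldIdx labs a < guldIdx labs b) := by
  induction labs generalizing p with
  | nil => simp [PySem.List.dedup]
  | cons x t ih =>
    by_cases hpx : p x = true
    · rw [List.filter_cons, if_pos hpx, guldDedup_cons]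
      have hmem : ∀ a ∈ PySem.List.dedup ((t.filter p).filter (fun y => y ≠ x)),
          a ∈ t ∧ a ≠ x := by
        intro a ha
        rw [PySem.List.mem_dedup] at ha
        have h1 := List.of_mem_filter ha
        have h2 := List.mem_of_mem_filter ha
        exact ⟨List.mem_of_mem_filter h2, by simpa using h1⟩
      constructor
      · intro b hb
        rcases hmem b hb with ⟨hbt, hbx⟩
        rw [guldIdx_cons_of_ne t hbx hbt]
        have : guldIdx (x :: t) x = 0 := by
          unfold guldIdx; rw [PySem.List.index?_cons_self]; rfl
        omega
      · have hrw : (t.filter p).filter (fun y => y ≠ x)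
            = t.filter (fun y => p y && decide (y ≠ x)) := by
          rw [List.filter_filter]
          apply List.filter_congr
          intro w _
          exact Bool.and_comm _ _
        rw [hrw]
        apply (ih (fun y => p y && decide (y ≠ x))).imp_of_mem
        intro a b ha hb hab
        have hrw' := hrw
        rw [← hrw'] at ha hb
        rcases hmem a ha with ⟨hat, hax⟩
        rcases hmem b hb with ⟨hbt, hbx⟩
        rw [guldIdx_cons_of_ne t hax hat, guldIdx_cons_of_ne t hbx hbt]
        omega
    · rw [List.filter_cons, if_neg hpx]
      apply (ih p).imp_of_mem
      intro a b ha hb hab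
      have hmem : ∀ c ∈ PySem.List.dedup (t.filter p), c ∈ t ∧ c ≠ x := by
        intro c hc
        rw [PySem.List.mem_dedup] at hc
        refine ⟨List.mem_of_mem_filter hc, ?_⟩
        intro hcx
        subst hcx
        exact hpx (List.of_mem_filter hc)
      rcases hmem a ha with ⟨hat, hax⟩
      rcases hmem b hb with ⟨hbt, hbx⟩
      rw [guldIdx_cons_of_ne t hax hat, guldIdx_cons_of_ne t hbx hbt]
      omega

-- B's sorted set of fresh labels IS the ordered dedup of the fresh labels
theorem guldSorted_eq (label_tag : String) (dataset : List (List (String × String)))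
    (d : PySem.Dict String Int) :
    PySem.List.sorted
        (PySem.Set.diff (PySem.Set.diff (PySem.Set.ofList (guldLabs label_tag dataset)) d.keys) [""])
        (fun lab => (PySem.List.index? (guldLabs label_tag dataset) lab).getD 0) false
      = PySem.List.dedup (guldFresh label_tag d dataset) := by
  set labs := guldLabs label_tag dataset with hlabs
  apply PySem.List.sorted_eq_of_perm_of_pairwise_lt
  · apply (List.perm_ext_iff_of_nodup (PySem.List.nodup_dedup _)
      (PySem.Set.nodup_diff _ _ (PySem.Set.nodup_diff _ _ (PySem.Set.nodup_ofList _)))).2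
    intro a
    rw [PySem.List.mem_dedup, PySem.Set.mem_diff, PySem.Set.mem_diff, PySem.Set.mem_ofList]
    unfold guldFresh
    rw [← hlabs, List.mem_filter]
    simp only [guldP, Bool.and_eq_true, Bool.not_eq_true', decide_eq_false_iff_not,
      List.mem_singleton]
    constructor
    · rintro ⟨hm, hne, hnc⟩
      refine ⟨⟨hm, ?_⟩, hne⟩
      intro hk
      rw [← PySem.Dict.contains_iff_mem_keys] at hk
      rw [hnc] at hk
      exact absurd hk (by simp)
    · rintro ⟨⟨hm, hk⟩, hne⟩
      refine ⟨hm, hne, ?_⟩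
      rw [← PySem.Dict.contains_iff_mem_keys] at hk
      exact Bool.not_eq_true _ ▸ (by simpa using hk)
  · exact guldPairwise labs (guldP d)

-- the two ways of writing Python's starting id agree
theorem guldBase_eq (d : PySem.Dict String Int) :
    (if d.values.length ≤ 0 then (0 : Int) else (PySem.List.max? d.values (fun x => x)).getD 0 + 1)
      = PySem.List.maxD d.values (fun x => x) (-1) + 1 := by
  unfold PySem.List.maxD
  cases h : PySem.List.max? d.values (fun x => x) with
  | none =>
    have : d.values = [] := (PySem.List.max?_eq_none_iff _ _).1 h
    simp [this]
  | some m =>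
    have hne : d.values ≠ [] := by
      intro hnil
      rw [hnil, (PySem.List.max?_eq_none_iff _ _).2 rfl] at h
      simp at h
    have : ¬ d.values.length ≤ 0 := by
      simpa [List.length_eq_zero_iff] using hne
    simp [this]

-- ===== VERDICT (by name: the statement is the Claim_ definition above) =====
theorem generate_unique_label_dict_spec : Claim_equal_generate_unique_label_dict := by
  intro dataset label_dict label_tag _ _
  unfold Spec_generate_unique_label_dict generate_unique_label_dict generate_unique_label_dict_alt
  dsimp only
  rw [guldLoopA_eq]
  have hlabs : dataset.map (fun item => ((PySem.Dict.mk item).get? label_tag).getD "")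
      = guldLabs label_tag dataset := rfl
  rw [hlabs, guldSorted_eq, guldEnum_eq_assign, guldBase_eq]
  rw [add_zero]
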